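-- pv_equiv track=rewrite | github.com/Ace1928/eidosian_forge | archive_forge/src/archive_forge/func__common_path_and_rest.py | _common_path_and_rest
-- ===== SOURCE A (Python) =====
-- def _common_path_and_rest(l1, l2, common=[]):
--     if len(l1) < 1:
--         return (common, l1, l2)
--     if len(l2) < 1:
--         return (common, l1, l2)
--     if l1[0] != l2[0]:
--         return (common, l1, l2)
--     return _common_path_and_rest(l1[1:], l2[1:], common + [l1[0:1]])
-- ===== SOURCE B (Python) =====
-- def _common_path_and_rest(l1, l2, common=[]):
--     i = 0
--     n = min(len(l1), len(l2))
--     while i < n and l1[i] == l2[i]: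
--         i += 1
--     return (common + [[x] for x in l1[:i]], l1[i:], l2[i:])
-- ===== Notes on version B (the rewrite author's own statement) =====
-- stated objective: faster
-- what changed: Replaces A's recursion with list-slicing at each step (quadratic in the common-prefix length) by a single index scan to the first mismatch followed by one slice, accumulating the output once.
import Mathlib
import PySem

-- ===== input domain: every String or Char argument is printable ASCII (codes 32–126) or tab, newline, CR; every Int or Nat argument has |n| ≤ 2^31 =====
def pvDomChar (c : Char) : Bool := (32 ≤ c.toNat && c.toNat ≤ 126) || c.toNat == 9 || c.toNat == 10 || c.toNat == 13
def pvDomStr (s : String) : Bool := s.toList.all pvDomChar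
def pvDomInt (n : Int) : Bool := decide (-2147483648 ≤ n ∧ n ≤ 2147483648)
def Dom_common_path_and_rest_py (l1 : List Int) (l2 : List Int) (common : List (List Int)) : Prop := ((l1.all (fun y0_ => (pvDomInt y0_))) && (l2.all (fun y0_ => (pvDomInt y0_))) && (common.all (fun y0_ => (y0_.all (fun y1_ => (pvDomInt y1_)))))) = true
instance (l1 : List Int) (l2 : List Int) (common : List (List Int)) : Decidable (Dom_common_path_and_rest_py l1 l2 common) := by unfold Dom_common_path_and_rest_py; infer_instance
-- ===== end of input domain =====

-- B replaces A's slice-per-step recursion by one index scan to the first mismatch and a single slice: faster (asymptotic).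


-- ===== PORT A =====
-- literal transliteration: early returns, then recursion on l1[1:], l2[1:], common + [l1[0:1]]
def common_path_and_rest_py (l1 : List Int) (l2 : List Int) (common : List (List Int)) : List (List Int) × List Int × List Int :=
  match l1, l2 with
  | [], _ => (common, l1, l2)
  | _, [] => (common, l1, l2)
  | x :: xs, y :: ys =>
    if x ≠ y then (common, l1, l2)
    else common_path_and_rest_py xs ys (common ++ [[x]])

-- ===== PORT B =====
-- the while loop: index of the first mismatch
def cprPrefixLen (l1 : List Int) (l2 : List Int) : Nat :=
  match l1, l2 with
  | x :: xs, y :: ys => if x = y then cprPrefixLen xs ys + 1 else 0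
  | _, _ => 0

def common_path_and_rest_py_alt (l1 : List Int) (l2 : List Int) (common : List (List Int)) : List (List Int) × List Int × List Int :=
  let i := cprPrefixLen l1 l2
  (common ++ (l1.take i).map (fun x => [x]), l1.drop i, l2.drop i)

-- ===== PRECONDITION & SPEC =====
def Spec_common_path_and_rest_py (l1 : List Int) (l2 : List Int) (common : List (List Int)) (out : List (List Int) × List Int × List Int) : Prop := out = common_path_and_rest_py_alt l1 l2 common
instance (l1 : List Int) (l2 : List Int) (common : List (List Int)) (out : List (List Int) × List Int × List Int) : Decidable (Spec_common_path_and_rest_py l1 l2 common out) := by unfold Spec_common_path_and_rest_py; infer_instance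

-- ===== CLAIM (what is proved, stated in full; the proofs are below) =====
def Claim_equal_common_path_and_rest_py : Prop := ∀ (l1 : List Int) (l2 : List Int) (common : List (List Int)), Dom_common_path_and_rest_py l1 l2 common → Spec_common_path_and_rest_py l1 l2 common (common_path_and_rest_py l1 l2 common)

-- ===== LEMMAS AND PROOFS =====
theorem cpr_eq_alt (l1 : List Int) (l2 : List Int) (common : List (List Int)) :
    common_path_and_rest_py l1 l2 common = common_path_and_rest_py_alt l1 l2 common := by
  induction l1 generalizing l2 common with
  | nil => cases l2 <;> simp [common_path_and_rest_py, common_path_and_rest_py_alt, cprPrefixLen]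
  | cons x xs ih =>
    cases l2 with
    | nil => simp [common_path_and_rest_py, common_path_and_rest_py_alt, cprPrefixLen]
    | cons y ys =>
      by_cases h : x = y
      · subst h
        simp [common_path_and_rest_py, common_path_and_rest_py_alt, cprPrefixLen, ih]
      · simp [common_path_and_rest_py, common_path_and_rest_py_alt, cprPrefixLen, h]

-- ===== VERDICT (by name: the statement is the Claim_ definition above) =====
theorem common_path_and_rest_py_spec : Claim_equal_common_path_and_rest_py := by
  intro l1 l2 common _
  exact cpr_eq_alt l1 l2 common
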